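-- pv_equiv track=rewrite | github.com/vaduvel/SUNDAY | core/advanced_cognition.py | _generate_safety_suggestions
-- ===== SOURCE A (Python) =====
-- from typing import Dict, List, Any, Optional, Callable
--
-- def _generate_safety_suggestions(concerns: List[str]) -> List[str]:
--     """Generate safety suggestions based on concerns."""
--     suggestions = []
--
--     if any("sudo" in c for c in concerns):
--         suggestions.append("Verifică exact ce face comanda înainte de executare")
--
--     if any("delete" in c or "remove" in c for c in concerns):
--         suggestions.append("Fă backup înainte de a continua")
--
--     if any("hack" in c for c in concerns):
--         suggestions.append("Asigură-te că ai permisiunea pentru ce faci")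
--
--     return suggestions
-- ===== SOURCE B (Python) =====
-- from typing import List
--
-- def _generate_safety_suggestions(concerns: List[str]) -> List[str]:
--     saw_sudo = saw_del = saw_hack = False
--     for c in concerns:
--         if "sudo" in c:
--             saw_sudo = True
--         if "delete" in c or "remove" in c:
--             saw_del = True
--         if "hack" in c:
--             saw_hack = True
--     out = []
--     if saw_sudo:
--         out.append("Verifică exact ce face comanda înainte de executare")
--     if saw_del:
--         out.append("Fă backup înainte de a continua")
--     if saw_hack:
--         out.append("Asigură-te că ai permisiunea pentru ce faci")
--     return out
-- ===== Notes on version B (the rewrite author's own statement) =====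
-- stated objective: alternative
-- what changed: Replaced three separate any() scans over concerns with a single pass that accumulates three match flags and emits the suggestions afterwards.
import Mathlib
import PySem

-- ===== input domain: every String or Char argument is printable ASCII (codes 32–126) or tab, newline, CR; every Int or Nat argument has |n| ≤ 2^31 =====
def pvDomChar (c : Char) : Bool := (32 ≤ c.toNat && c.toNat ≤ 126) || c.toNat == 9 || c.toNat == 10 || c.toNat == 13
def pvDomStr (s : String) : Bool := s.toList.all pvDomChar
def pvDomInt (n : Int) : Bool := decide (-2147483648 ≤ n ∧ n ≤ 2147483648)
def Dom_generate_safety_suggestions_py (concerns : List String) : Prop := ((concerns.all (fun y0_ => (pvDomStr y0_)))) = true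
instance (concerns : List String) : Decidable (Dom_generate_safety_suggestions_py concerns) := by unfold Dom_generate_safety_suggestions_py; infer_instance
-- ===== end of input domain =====

-- B fuses A's three any() scans into one pass accumulating three flags (alternative decomposition, same output).


-- ===== PORT A =====
def generate_safety_suggestions_py (concerns : List String) : List String :=
  let suggestions : List String := []
  let suggestions := if concerns.any (fun c => PySem.Str.isIn "sudo" c) then
      suggestions ++ ["Verifică exact ce face comanda înainte de executare"] else suggestions
  let suggestions := if concerns.any (fun c => PySem.Str.isIn "delete" c || PySem.Str.isIn "remove" c) then
      suggestions ++ ["Fă backup înainte de a continua"] else suggestions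
  let suggestions := if concerns.any (fun c => PySem.Str.isIn "hack" c) then
      suggestions ++ ["Asigură-te că ai permisiunea pentru ce faci"] else suggestions
  suggestions

-- ===== PORT B =====
def generate_safety_suggestions_py_alt (concerns : List String) : List String :=
  let flags := concerns.foldl
    (fun (acc : Bool × Bool × Bool) c =>
      (acc.1 || PySem.Str.isIn "sudo" c,
       acc.2.1 || (PySem.Str.isIn "delete" c || PySem.Str.isIn "remove" c),
       acc.2.2 || PySem.Str.isIn "hack" c))
    (false, false, false)
  (if flags.1 then ["Verifică exact ce face comanda înainte de executare"] else []) ++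
  (if flags.2.1 then ["Fă backup înainte de a continua"] else []) ++
  (if flags.2.2 then ["Asigură-te că ai permisiunea pentru ce faci"] else [])

-- ===== PRECONDITION & SPEC =====
def Spec_generate_safety_suggestions_py (concerns : List String) (out : List String) : Prop := out = generate_safety_suggestions_py_alt concerns
instance (concerns : List String) (out : List String) : Decidable (Spec_generate_safety_suggestions_py concerns out) := by unfold Spec_generate_safety_suggestions_py; infer_instance

-- ===== CLAIM (what is proved, stated in full; the proofs are below) =====
def Claim_equal_generate_safety_suggestions_py : Prop := ∀ (concerns : List String), Dom_generate_safety_suggestions_py concerns → Spec_generate_safety_suggestions_py concerns (generate_safety_suggestions_py concerns)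

-- ===== LEMMAS AND PROOFS =====
theorem pv_foldl_flags (concerns : List String) (b1 b2 b3 : Bool) :
    concerns.foldl
      (fun (acc : Bool × Bool × Bool) c =>
        (acc.1 || PySem.Str.isIn "sudo" c,
         acc.2.1 || (PySem.Str.isIn "delete" c || PySem.Str.isIn "remove" c),
         acc.2.2 || PySem.Str.isIn "hack" c))
      (b1, b2, b3)
    = (b1 || concerns.any (fun c => PySem.Str.isIn "sudo" c),
       b2 || concerns.any (fun c => PySem.Str.isIn "delete" c || PySem.Str.isIn "remove" c),
       b3 || concerns.any (fun c => PySem.Str.isIn "hack" c)) := by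
  induction concerns generalizing b1 b2 b3 with
  | nil => simp
  | cons c cs ih => rw [List.foldl_cons, ih]; simp [Bool.or_assoc]


-- ===== VERDICT (by name: the statement is the Claim_ definition above) =====
theorem generate_safety_suggestions_py_spec : Claim_equal_generate_safety_suggestions_py := by
  intro concerns _
  unfold Spec_generate_safety_suggestions_py generate_safety_suggestions_py generate_safety_suggestions_py_alt
  rw [pv_foldl_flags]
  simp only [Bool.false_or]
  split_ifs <;> simp
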